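-- pv_equiv track=rewrite | github.com/kimbongdda/paper_translator | paper_translator.py | _clean_ocr_artifacts
-- ===== SOURCE A (Python) =====
-- def _clean_ocr_artifacts(text: str) -> str:
--     """
--     marker OCR 아티팩트 정리:
--     1. 라인 내 짧은 패턴 반복 압축
--     2. 연속 중복 라인 제거
--     3. 단락 수준 중복 제거
--     """
--     # 1) 라인 내 반복 패턴 압축
--     def collapse_line(line: str) -> str:
--         n = len(line)
--         if n < 40:
--             return line
--         for unit_len in range(4, min(61, n // 5 + 1)):
--             unit = line[:unit_len]
--             i, reps = 0, 0
--             while i + unit_len <= n and line[i:i + unit_len] == unit: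
--                 reps += 1
--                 i += unit_len
--             if reps >= 5:
--                 return unit.rstrip()
--         return line
--
--     lines = [collapse_line(l) for l in text.split('\n')]
--
--     # 2) 연속 중복 라인 제거
--     deduped_lines = []
--     prev, rep = None, 0
--     for line in lines:
--         if line == prev and line.strip():
--             rep += 1
--             if rep < 2:
--                 deduped_lines.append(line)
--         else:
--             rep = 0
--             deduped_lines.append(line)
--         prev = line
--     text = '\n'.join(deduped_lines)
--
--     # 3) 단락 수준 중복 제거
--     paragraphs = text.split('\n\n')
--     seen: set[str] = set()
--     unique_paras = []
--     for para in paragraphs: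
--         key = para.strip()[:100]
--         if len(key) > 60 and key in seen:
--             continue
--         if len(key) > 60:
--             seen.add(key)
--         unique_paras.append(para)
--     return '\n\n'.join(unique_paras)
-- ===== SOURCE B (Python) =====
-- def _clean_ocr_artifacts(text: str) -> str:
--     """Same cleanup; the consecutive-line dedup is rewritten as an explicit
--     'group maximal runs of equal lines, emit capped counts' pass instead of
--     A's prev/rep state machine."""
--     def collapse_line(line: str) -> str:
--         n = len(line)
--         if n < 40:
--             return line
--         for unit_len in range(4, min(61, n // 5 + 1)):
--             unit = line[:unit_len]
--             i, reps = 0, 0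
--             while i + unit_len <= n and line[i:i + unit_len] == unit:
--                 reps += 1
--                 i += unit_len
--             if reps >= 5:
--                 return unit.rstrip()
--         return line
--
--     lines = [collapse_line(l) for l in text.split('\n')]
--
--     # consecutive dedup by maximal runs: blank-ish runs kept whole,
--     # non-blank runs capped at their first two copies
--     deduped_lines = []
--     i, n = 0, len(lines)
--     while i < n:
--         j = i + 1
--         while j < n and lines[j] == lines[i]:
--             j += 1
--         run = lines[i:j]
--         deduped_lines.extend(run if not lines[i].strip() else run[:2])
--         i = j
--     text = '\n'.join(deduped_lines)
--
--     paragraphs = text.split('\n\n')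
--     seen: set[str] = set()
--     unique_paras = []
--     for para in paragraphs:
--         key = para.strip()[:100]
--         if len(key) > 60 and key in seen:
--             continue
--         if len(key) > 60:
--             seen.add(key)
--         unique_paras.append(para)
--     return '\n\n'.join(unique_paras)
-- ===== Notes on version B (the rewrite author's own statement) =====
-- stated objective: simpler
-- what changed: The consecutive-line dedup is rewritten as a grouping pass over maximal runs of equal lines, emitting blank runs whole and capping every other run at its first two copies, instead of A's prev/rep state-machine loop; collapse_line and the paragraph dedup are unchanged.
import Mathlib
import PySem

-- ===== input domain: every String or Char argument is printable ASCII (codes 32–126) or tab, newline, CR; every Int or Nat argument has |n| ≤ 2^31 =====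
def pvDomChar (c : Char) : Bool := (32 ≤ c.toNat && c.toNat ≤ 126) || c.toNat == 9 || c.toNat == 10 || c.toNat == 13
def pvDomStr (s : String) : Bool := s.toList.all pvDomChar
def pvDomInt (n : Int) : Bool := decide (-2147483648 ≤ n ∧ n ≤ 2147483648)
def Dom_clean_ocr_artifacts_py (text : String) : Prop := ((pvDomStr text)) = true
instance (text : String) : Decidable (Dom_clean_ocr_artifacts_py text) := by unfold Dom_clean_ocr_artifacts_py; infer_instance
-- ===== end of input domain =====

-- B rewrites the consecutive-line dedup as a grouping pass over maximal runs of equal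
-- lines (blank-ish runs kept whole, other runs capped at their first two copies) instead
-- of A's prev/rep state machine; collapse_line and the paragraph dedup are textually
-- identical in the two Pythons and are shared helpers here. Objective: simpler.

-- ===== PORT A =====
-- shared stage 1: collapse_line. Inner while loop; the '0 < unitLen' conjunct is a
-- totality guard only (every caller passes 4 ≤ unitLen).
-- '(cs.drop i).take unitLen' is line[i:i+unit_len] (= PySem.List.slice_natCast_add).
def pvRepsLoop (cs unit : List Char) (unitLen i reps : Nat) : Nat :=
  if h : 0 < unitLen ∧ i + unitLen ≤ cs.length ∧ (cs.drop i).take unitLen = unit then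
    pvRepsLoop cs unit unitLen (i + unitLen) (reps + 1)
  else reps
termination_by cs.length - i
decreasing_by omega

-- the for-loop over unit_len in range(4, min(61, n//5+1)), early return on reps >= 5
def pvCollapseLoop (cs : List Char) : List Nat → List Char
  | [] => cs
  | u :: rest =>
    let unit := cs.take u          -- line[:unit_len]
    if 5 ≤ pvRepsLoop cs unit u 0 0 then PySem.Chars.rstrip unit
    else pvCollapseLoop cs rest

def pvCollapseLine (line : String) : String :=
  let cs := line.toList
  let n := cs.length
  if n < 40 then line
  -- range(4, min(61, n//5+1)); n ≥ 40 so min 61 (n/5+1) ≥ 9 ≥ 4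
  else String.ofList (pvCollapseLoop cs (List.range' 4 (min 61 (n / 5 + 1) - 4)))

-- s.split(sep) for sep ≠ "" (the total form of PySem.Str.split?)
def pvSplit (s sep : String) : List String :=
  (PySem.Chars.splitOn s.toList sep.toList).map String.ofList

-- shared stage 3: the paragraph-level dedup loop (seen-set of long keys)
def pvParaDedup (t : String) : String :=
  let paragraphs := pvSplit t "\n\n"
  let r := paragraphs.foldl (fun (st : PySem.Set String × List String) para =>
      let key := String.ofList ((PySem.Str.strip para).toList.take 100)  -- para.strip()[:100]
      if 60 < key.toList.length && PySem.Set.contains st.1 key then st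
      else if 60 < key.toList.length then (PySem.Set.add st.1 key, st.2 ++ [para])
      else (st.1, st.2 ++ [para])) ([], [])
  PySem.Str.join "\n\n" r.2

-- the body of A's stage-2 loop over state (deduped_lines, prev, rep)
def pvStepA (st : List String × Option String × Int) (line : String) :
    List String × Option String × Int :=
  if (some line == st.2.1) && (PySem.Str.strip line != "") then
    (if st.2.2 + 1 < 2 then st.1 ++ [line] else st.1, some line, st.2.2 + 1)
  else (st.1 ++ [line], some line, 0)

def clean_ocr_artifacts_py (text : String) : String :=
  let lines := (pvSplit text "\n").map pvCollapseLine
  let r := lines.foldl pvStepA ([], none, 0)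
  pvParaDedup (PySem.Str.join "\n" r.1)

-- ===== PORT B =====
-- stage 2, B: group maximal runs of equal consecutive lines; a blank-ish run is kept
-- whole, any other run is capped at its first two copies.
def pvDedupRuns : List String → List String
  | [] => []
  | l :: t =>
    let run := l :: t.takeWhile (· == l)
    (if PySem.Str.strip l == "" then run else run.take 2)
      ++ pvDedupRuns (t.dropWhile (· == l))
termination_by ls => ls.length
decreasing_by
  have := List.length_dropWhile_le (fun x => x == l) t
  simp only [List.length_cons]; omega

def clean_ocr_artifacts_py_alt (text : String) : String :=
  let lines := (pvSplit text "\n").map pvCollapseLine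
  pvParaDedup (PySem.Str.join "\n" (pvDedupRuns lines))

-- ===== PRECONDITION & SPEC =====
def Spec_clean_ocr_artifacts_py (text : String) (out : String) : Prop := out = clean_ocr_artifacts_py_alt text
instance (text : String) (out : String) : Decidable (Spec_clean_ocr_artifacts_py text out) := by unfold Spec_clean_ocr_artifacts_py; infer_instance

-- ===== CLAIM (what is proved, stated in full; the proofs are below) =====
def Claim_equal_clean_ocr_artifacts_py : Prop := ∀ (text : String), Dom_clean_ocr_artifacts_py text → Spec_clean_ocr_artifacts_py text (clean_ocr_artifacts_py text)

-- ===== LEMMAS AND PROOFS =====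

theorem pvStepA_pos (acc : List String) (prev : Option String) (rep : Int) (line : String)
    (hc : ((some line == prev) && (PySem.Str.strip line != "")) = true) :
    pvStepA (acc, prev, rep) line
      = (if rep + 1 < 2 then acc ++ [line] else acc, some line, rep + 1) := by
  simp only [pvStepA, hc, if_true]

theorem pvStepA_neg (acc : List String) (prev : Option String) (rep : Int) (line : String)
    (hc : ((some line == prev) && (PySem.Str.strip line != "")) = false) :
    pvStepA (acc, prev, rep) line = (acc ++ [line], some line, 0) := by
  simp only [pvStepA, hc, Bool.false_eq_true, if_false]

-- what A's stage-2 fold emits from state (prev, rep) onwards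
def pvEmit (prev : Option String) (rep : Int) : List String → List String
  | [] => []
  | l :: ls =>
    if (some l == prev) && (PySem.Str.strip l != "") then
      (if rep + 1 < 2 then [l] else []) ++ pvEmit (some l) (rep + 1) ls
    else l :: pvEmit (some l) 0 ls

-- the head of ls does not extend a duplicate run of previous line p
def pvFresh (p : Option String) : List String → Prop
  | [] => True
  | h :: _ => ((some h == p) && (PySem.Str.strip h != "")) = false

theorem pv_foldl_emit (ls : List String) : ∀ (acc : List String) (prev : Option String) (rep : Int),
    (ls.foldl pvStepA (acc, prev, rep)).1 = acc ++ pvEmit prev rep ls := by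
  induction ls with
  | nil => intro acc prev rep; simp [pvEmit]
  | cons l ls ih =>
    intro acc prev rep
    rw [List.foldl_cons]
    by_cases hc : ((some l == prev) && (PySem.Str.strip l != "")) = true
    · rw [pvStepA_pos acc prev rep l hc, pvEmit, if_pos hc]
      by_cases hr : rep + 1 < 2
      · rw [if_pos hr, ih, if_pos hr]; simp
      · rw [if_neg hr, ih, if_neg hr]; simp
    · have hc' := Bool.not_eq_true _ |>.mp hc
      rw [pvStepA_neg acc prev rep l hc', pvEmit, if_neg hc, ih]
      simp

theorem pv_emit_drop (h : String) (hnb : (PySem.Str.strip h == "") = false) :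
    ∀ (t : List String) (r : Int), 1 ≤ r →
      pvEmit (some h) r t
        = pvEmit (some h) (r + (t.takeWhile (· == h)).length) (t.dropWhile (· == h)) := by
  intro t
  induction t with
  | nil => intro r _; simp [pvEmit]
  | cons x t ih =>
    intro r hr
    by_cases hx : (x == h) = true
    · have hxe : x = h := by simpa using hx
      subst hxe
      have hcond : ((some x == some x) && (PySem.Str.strip x != "")) = true := by
        simp [bne, hnb]
      rw [pvEmit, if_pos hcond, if_neg (by omega : ¬ (r + 1 < 2)),
        ih (r + 1) (by omega)]
      simp only [List.takeWhile_cons, List.dropWhile_cons, hx, if_true, List.length_cons,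
        List.nil_append]
      congr 1
      push_cast
      ring
    · have hx' : (x == h) = false := by simpa using hx
      simp only [List.takeWhile_cons, List.dropWhile_cons, hx', Bool.false_eq_true, if_false,
        List.length_nil, Nat.cast_zero, add_zero]

theorem pv_emit_keep_first (h : String) (hnb : (PySem.Str.strip h == "") = false) (t : List String) :
    pvEmit (some h) 0 t
      = (t.takeWhile (· == h)).take 1
        ++ pvEmit (some h) (t.takeWhile (· == h)).length (t.dropWhile (· == h)) := by
  cases t with
  | nil => simp [pvEmit]
  | cons x t =>
    by_cases hx : (x == h) = true
    · have hxe : x = h := by simpa using hx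
      subst hxe
      have hcond : ((some x == some x) && (PySem.Str.strip x != "")) = true := by
        simp [bne, hnb]
      rw [pvEmit, if_pos hcond, if_pos (by omega : (0 : Int) + 1 < 2)]
      have h01 : (0 : Int) + 1 = 1 := by norm_num
      rw [h01, pv_emit_drop x hnb t 1 le_rfl]
      simp only [List.takeWhile_cons, List.dropWhile_cons, hx, if_true, List.length_cons,
        List.take_succ_cons, List.take_zero, List.cons_append,
        List.nil_append]
      congr 2
      push_cast
      ring
    · have hx' : (x == h) = false := by simpa using hx
      simp only [List.takeWhile_cons, List.dropWhile_cons, hx', Bool.false_eq_true, if_false,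
        List.take_nil, List.length_nil, Nat.cast_zero, List.nil_append]

theorem pv_emit_blank_run (h : String) (hb : (PySem.Str.strip h == "") = true) :
    ∀ (t : List String) (r : Int),
      pvEmit (some h) r t
        = t.takeWhile (· == h) ++ pvEmit (some h) 0 (t.dropWhile (· == h)) := by
  intro t
  induction t with
  | nil => intro r; simp [pvEmit]
  | cons x t ih =>
    intro r
    by_cases hx : (x == h) = true
    · have hxe : x = h := by simpa using hx
      subst hxe
      have hcond : ((some x == some x) && (PySem.Str.strip x != "")) = false := by
        simp only [beq_self_eq_true, Bool.true_and, bne, hb, Bool.not_true]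
      simp only [List.takeWhile_cons, List.dropWhile_cons, hx, if_true, List.cons_append]
      rw [pvEmit, if_neg (Bool.eq_false_iff.mp hcond), ih 0]
    · have hx' : (x == h) = false := by simpa using hx
      have hcond : ((some x == some h) && (PySem.Str.strip x != "")) = false := by
        simp [hx']
      simp only [List.takeWhile_cons, List.dropWhile_cons, hx', Bool.false_eq_true, if_false,
        List.nil_append]
      rw [pvEmit, pvEmit, if_neg (Bool.eq_false_iff.mp hcond), if_neg (Bool.eq_false_iff.mp hcond)]

theorem pv_fresh_dropWhile (h : String) (t : List String) :
    pvFresh (some h) (t.dropWhile (· == h)) := by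
  induction t with
  | nil => trivial
  | cons x t ih =>
    by_cases hx : (x == h) = true
    · simpa [List.dropWhile_cons, hx] using ih
    · have hx' : (x == h) = false := by simpa using hx
      simp only [List.dropWhile_cons, hx', Bool.false_eq_true, if_false]
      show ((some x == some h) && (PySem.Str.strip x != "")) = false
      simp [hx']

theorem pv_emit_eq_dedupRuns (n : Nat) : ∀ (ls : List String), ls.length ≤ n →
    ∀ (p : Option String) (r : Int), pvFresh p ls → pvEmit p r ls = pvDedupRuns ls := by
  induction n with
  | zero =>
    intro ls hl p r _
    have : ls = [] := List.length_eq_zero_iff.mp (Nat.le_zero.mp hl)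
    subst this
    simp [pvEmit, pvDedupRuns]
  | succ n ih =>
    intro ls hl p r hf
    cases ls with
    | nil => simp [pvEmit, pvDedupRuns]
    | cons h t =>
      have hcond : ((some h == p) && (PySem.Str.strip h != "")) = false := hf
      rw [pvEmit, if_neg (by simp [hcond]), pvDedupRuns]
      have hdl : (t.dropWhile (· == h)).length ≤ n := by
        have := List.length_dropWhile_le (fun x => x == h) t
        simp only [List.length_cons] at hl
        omega
      have hfd := pv_fresh_dropWhile h t
      by_cases hb : (PySem.Str.strip h == "") = true
      · rw [pv_emit_blank_run h hb t 0, ih _ hdl (some h) 0 hfd]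
        simp [hb]
      · have hnb : (PySem.Str.strip h == "") = false := by simpa using hb
        rw [pv_emit_keep_first h hnb t, ih _ hdl (some h) _ hfd]
        simp [hnb, List.take_succ_cons]

theorem pv_stage2_eq (lines : List String) :
    (lines.foldl pvStepA ([], none, 0)).1 = pvDedupRuns lines := by
  rw [pv_foldl_emit lines [] none 0, List.nil_append]
  refine pv_emit_eq_dedupRuns lines.length lines le_rfl none 0 ?_
  cases lines with
  | nil => trivial
  | cons h t => show ((some h == none) && _) = false; simp

-- ===== VERDICT (by name: the statement is the Claim_ definition above) =====
theorem clean_ocr_artifacts_py_spec : Claim_equal_clean_ocr_artifacts_py := by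
  intro text _
  show clean_ocr_artifacts_py text = clean_ocr_artifacts_py_alt text
  simp only [clean_ocr_artifacts_py, clean_ocr_artifacts_py_alt]
  rw [pv_stage2_eq]
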